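-- pv_equiv track=rewrite | github.com/Guilherme-LTS/PROVA_AED2 | arranjo.py | gerar_arranjos
-- ===== SOURCE A (Python) =====
-- def gerar_arranjos(conjunto, k):
--     if k == 0:
--         return [[]], 1
--     elif len(conjunto) == 0:
--         return [], 0
--     else:
--         arranjos = []
--         num_arranjos = 0
--         for i in range(len(conjunto)):
--             item = conjunto[i]
--             subconjunto = conjunto[:i] + conjunto[i+1:]
--             arranjos_subconjunto, num_arranjos_subconjunto = gerar_arranjos(subconjunto, k-1)
--             arranjos_subconjunto = [[item] + arranjo for arranjo in arranjos_subconjunto]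
--             arranjos += arranjos_subconjunto
--             num_arranjos += num_arranjos_subconjunto
--         return arranjos, num_arranjos
-- ===== SOURCE B (Python) =====
-- def gerar_arranjos(conjunto, k):
--     if k < 0:
--         return [], 0
--     level = [([], list(conjunto))]
--     for _ in range(k):
--         if not level:
--             break
--         level = [(pref + [rest[j]], rest[:j] + rest[j+1:])
--                  for pref, rest in level
--                  for j in range(len(rest))]
--     res = [pref for pref, _ in level]
--     return res, len(res)
-- ===== Notes on version B (the rewrite author's own statement) =====
-- stated objective: alternative
-- what changed: Replaces A's recursion (pick each element, recurse on the remaining set with k-1, prepend, and sum sub-counts) with an iterative breadth-first level expansion: maintain a list of (prefix, remaining) states, expand it k times, then return the prefixes and their length as the count.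
import Mathlib
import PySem

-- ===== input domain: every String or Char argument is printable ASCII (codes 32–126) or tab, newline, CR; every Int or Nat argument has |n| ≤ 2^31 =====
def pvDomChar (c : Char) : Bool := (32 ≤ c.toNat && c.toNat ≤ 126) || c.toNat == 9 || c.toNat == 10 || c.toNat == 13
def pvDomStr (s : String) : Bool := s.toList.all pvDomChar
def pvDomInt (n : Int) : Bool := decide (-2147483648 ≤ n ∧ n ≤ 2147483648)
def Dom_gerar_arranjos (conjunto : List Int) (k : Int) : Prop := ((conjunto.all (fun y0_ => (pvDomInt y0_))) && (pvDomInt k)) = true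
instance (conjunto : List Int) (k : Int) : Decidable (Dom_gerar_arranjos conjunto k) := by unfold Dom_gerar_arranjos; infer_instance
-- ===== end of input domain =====

-- B replaces A's recursive arrangement generation with an iterative level-by-level expansion (alternative decomposition, same cost).


-- ===== PORT A =====
mutual
-- literal port of A: the `for i in range(len(conjunto))` loop is pvGo, accumulating (arranjos, num_arranjos)
def gerar_arranjos (conjunto : List Int) (k : Int) : List (List Int) × Int :=
  if k = 0 then ([[]], 1)
  else if conjunto.length = 0 then ([], 0)
  else pvGo conjunto k 0 ([], 0)
termination_by (conjunto.length, conjunto.length + 1)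
decreasing_by apply Prod.Lex.right; omega

def pvGo (c : List Int) (k : Int) (i : Nat) (acc : List (List Int) × Int) : List (List Int) × Int :=
  if i < c.length then
    let item := c.getD i 0
    let sub := c.take i ++ c.drop (i+1)          -- conjunto[:i] + conjunto[i+1:]
    let r := gerar_arranjos sub (k-1)
    pvGo c k (i+1) (acc.1 ++ r.1.map (fun a => item :: a), acc.2 + r.2)
  else acc
termination_by (c.length, c.length - i)
decreasing_by
  · apply Prod.Lex.left
    simp only [List.length_append, List.length_take, List.length_drop]
    omega
  · apply Prod.Lex.right; omega
end

-- ===== PORT B =====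
-- one expansion step: every (prefix, rest) state spawns one state per index j of rest
def pvStep (level : List (List Int × List Int)) : List (List Int × List Int) :=
  level.flatMap (fun pr =>
    (List.range pr.2.length).map (fun j =>
      (pr.1 ++ [pr.2.getD j 0], pr.2.take j ++ pr.2.drop (j+1))))

-- B's `for _ in range(k)` loop with the `if not level: break` early exit
def pvLoop : Nat → List (List Int × List Int) → List (List Int × List Int)
  | 0, level => level
  | n+1, level => if level = [] then level else pvLoop n (pvStep level)

def gerar_arranjos_alt (conjunto : List Int) (k : Int) : List (List Int) × Int :=
  if k < 0 then ([], 0)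
  else
    let level := pvLoop k.toNat [([], conjunto)]
    let res := level.map Prod.fst
    (res, (res.length : Int))

-- ===== PRECONDITION & SPEC =====
def Spec_gerar_arranjos (conjunto : List Int) (k : Int) (out : List (List Int) × Int) : Prop := out = gerar_arranjos_alt conjunto k
instance (conjunto : List Int) (k : Int) (out : List (List Int) × Int) : Decidable (Spec_gerar_arranjos conjunto k out) := by unfold Spec_gerar_arranjos; infer_instance

-- ===== CLAIM (what is proved, stated in full; the proofs are below) =====
def Claim_equal_gerar_arranjos : Prop := ∀ (conjunto : List Int) (k : Int), Dom_gerar_arranjos conjunto k → Spec_gerar_arranjos conjunto k (gerar_arranjos conjunto k)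

-- ===== LEMMAS AND PROOFS =====

-- delete the j-th element
def pvDel (c : List Int) (j : Nat) : List Int := c.take j ++ c.drop (j+1)

-- the list/count that A's loop produces from index i on
def pvChunks (c : List Int) (k : Int) (i : Nat) : List (List Int) :=
  (List.range' i (c.length - i)).flatMap
    (fun j => ((gerar_arranjos (pvDel c j) (k-1)).1).map (fun a => c.getD j 0 :: a))

def pvCounts (c : List Int) (k : Int) (i : Nat) : Int :=
  ((List.range' i (c.length - i)).map (fun j => (gerar_arranjos (pvDel c j) (k-1)).2)).sum

lemma pvGo_eq (c : List Int) (k : Int) : ∀ i acc,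
    pvGo c k i acc = (acc.1 ++ pvChunks c k i, acc.2 + pvCounts c k i) := by
  intro i
  induction' hn : c.length - i using Nat.strong_induction_on with m IH generalizing i
  intro acc
  by_cases h : i < c.length
  · obtain ⟨m', rfl⟩ : ∃ m', m = m' + 1 := ⟨c.length - (i+1), by omega⟩
    rw [pvGo]
    simp only [h, if_pos]
    rw [IH m' (by omega) (i+1) (by omega)]
    have hr : List.range' i (c.length - i) = i :: List.range' (i+1) (c.length - (i+1)) := by
      have h2 : c.length - i = (c.length - (i+1)) + 1 := by omega
      rw [h2, List.range'_succ]
    simp only [pvChunks, pvCounts, hr, List.flatMap_cons, List.map_cons, List.sum_cons, pvDel]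
    simp only [Prod.mk.injEq]
    exact ⟨by simp [List.append_assoc], by ring⟩
  · rw [pvGo]
    simp only [h, if_neg, not_false_iff]
    have h0 : c.length - i = 0 := by omega
    simp [pvChunks, pvCounts, h0]

lemma gerar_unfold (c : List Int) (k : Int) (hk : k ≠ 0) (hc : c ≠ []) :
    gerar_arranjos c k = (pvChunks c k 0, pvCounts c k 0) := by
  rw [gerar_arranjos]
  simp [hk, hc, List.length_eq_zero_iff, pvGo_eq]

lemma pvDel_len_lt (c : List Int) (j : Nat) (hj : j < c.length) :
    (pvDel c j).length < c.length := by
  simp only [pvDel, List.length_append, List.length_take, List.length_drop]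
  omega

lemma gerar_neg : ∀ (c : List Int) (k : Int), k < 0 → gerar_arranjos c k = ([], 0) := by
  intro c
  induction' hn : c.length using Nat.strong_induction_on with m IH generalizing c
  intro k hk
  by_cases hc : c = []
  · rw [gerar_arranjos]; simp [show k ≠ 0 by omega, hc]
  · rw [gerar_unfold c k (by omega) hc]
    have hdel : ∀ j ∈ List.range' 0 (c.length - 0),
        gerar_arranjos (pvDel c j) (k-1) = ([], 0) := by
      intro j hj
      simp only [List.mem_range'_1] at hj
      exact IH ((pvDel c j).length) (hn ▸ pvDel_len_lt c j (by omega)) (pvDel c j) rfl (k-1) (by omega)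
    have h1 : pvChunks c k 0 = [] := by
      simp only [pvChunks, List.flatMap_eq_nil_iff]
      intro j hj; rw [hdel j hj]; simp
    have h2 : pvCounts c k 0 = 0 := by
      simp only [pvCounts]
      rw [List.sum_eq_zero]
      intro x hx
      simp only [List.mem_map] at hx
      obtain ⟨j, hj, rfl⟩ := hx
      rw [hdel j hj]
    rw [h1, h2]

lemma pv_sum_cast {α : Type} (l : List α) (f : α → Int) (g : α → Nat)
    (h : ∀ x ∈ l, f x = (g x : Int)) : (l.map f).sum = ((l.map g).sum : Int) := by
  induction l with
  | nil => simp
  | cons a t ih =>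
    simp only [List.map_cons, List.sum_cons, Nat.cast_add]
    rw [h a (List.mem_cons_self ..), ih (fun x hx => h x (List.mem_cons_of_mem _ hx))]

lemma gerar_len : ∀ (c : List Int) (k : Int),
    (gerar_arranjos c k).2 = (((gerar_arranjos c k).1).length : Int) := by
  intro c
  induction' hn : c.length using Nat.strong_induction_on with m IH generalizing c
  intro k
  by_cases hk : k = 0
  · subst hk; rw [gerar_arranjos]; simp
  · by_cases hc : c = []
    · rw [gerar_arranjos]; simp [hk, hc]
    · rw [gerar_unfold c k hk hc]
      simp only [pvChunks, pvCounts, List.length_flatMap]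
      apply pv_sum_cast
      intro j hj
      simp only [List.mem_range'_1] at hj
      rw [List.length_map]
      exact IH ((pvDel c j).length) (hn ▸ pvDel_len_lt c j (by omega)) (pvDel c j) rfl (k-1)

lemma elem_id (p r : List Int) (n : Nat) :
    (List.range r.length).flatMap
        (fun j => ((gerar_arranjos (pvDel r j) (n : Int)).1).map (fun a => (p ++ [r.getD j 0]) ++ a))
      = ((gerar_arranjos r ((n : Int) + 1)).1).map (fun a => p ++ a) := by
  by_cases hr : r = []
  · subst hr; rw [gerar_arranjos]; simp [show ((n:Int)+1) ≠ 0 by omega]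
  · rw [gerar_unfold r ((n:Int)+1) (by omega) hr]
    simp only [pvChunks, Nat.sub_zero, add_sub_cancel_right, ← List.range_eq_range',
      List.map_flatMap, List.map_map]
    congr 1
    funext j
    congr 1
    funext a
    simp [List.append_assoc]

lemma pvLoop_spec : ∀ (n : Nat) (level : List (List Int × List Int)),
    (pvLoop n level).map Prod.fst
      = level.flatMap (fun pr => ((gerar_arranjos pr.2 (n : Int)).1).map (fun a => pr.1 ++ a)) := by
  intro n
  induction n with
  | zero =>
    intro level
    rw [pvLoop]
    have h0 : ∀ r : List Int, (gerar_arranjos r (0 : Int)).1 = [[]] := by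
      intro r; rw [gerar_arranjos]; simp
    simp only [Nat.cast_zero, h0]
    induction level with
    | nil => simp
    | cons a t ih => simp [ih]
  | succ n IH =>
    intro level
    rw [pvLoop]
    by_cases hl : level = []
    · simp [hl]
    · rw [if_neg hl, IH]
      unfold pvStep
      rw [List.flatMap_assoc]
      have hcast : ((n + 1 : Nat) : Int) = (n : Int) + 1 := by push_cast; ring
      rw [hcast]
      congr 1
      funext pr
      rw [List.flatMap_map]
      have h := elem_id pr.1 pr.2 n
      simp only [pvDel] at h
      simpa using h

-- ===== VERDICT (by name: the statement is the Claim_ definition above) =====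
theorem gerar_arranjos_spec : Claim_equal_gerar_arranjos := by
  intro c k _
  unfold Spec_gerar_arranjos gerar_arranjos_alt
  by_cases hk : k < 0
  · rw [if_pos hk, gerar_neg c k hk]
  · rw [if_neg hk]
    have hres : (pvLoop k.toNat [([], c)]).map Prod.fst = (gerar_arranjos c k).1 := by
      rw [pvLoop_spec]
      have hc : ((k.toNat : Nat) : Int) = k := Int.toNat_of_nonneg (by omega)
      simp [hc]
    simp only [hres]
    rw [← gerar_len c k]
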